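-- pv_equiv track=rewrite | github.com/Peachypie98/programmers-python | 프로그래머스/레벨1/[1차] 비밀지도.py | solution
-- ===== SOURCE A (Python) =====
-- def solution(n, arr1, arr2):
--     c = [n] * n
--     arr1 = list(map(two_bit, c, arr1))
--     arr2 = list(map(two_bit, c, arr2))
--     answer = ""
--     a = []
--     for x,y in zip(arr1, arr2):
--         for i in range(n):
--             if(x[i] == y[i] and x[i] == "0"):
--                 answer += " "
--             else:
--                 answer += "#"
--         a.append(answer)
--         answer = ""
--     return a;
--
-- def two_bit(n, num):
--     bit = ""
--     while(num != 0):
--         quotient = num // 2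
--         bit += str(num % 2)
--         num = quotient
--     bit = bit[::-1]
--     if (n > len(bit)):
--         bit = "0"*(n-len(bit)) + bit
--     return bit
-- ===== SOURCE B (Python) =====
-- def solution(n, arr1, arr2):
--     table = str.maketrans('10', '# ')
--     return [format(a | b, f'0{n}b').translate(table)
--             for a, b in zip(arr1[:n], arr2[:n])]
-- ===== Notes on version B (the rewrite author's own statement) =====
-- stated objective: idiomatic
-- what changed: B replaces A's hand-rolled per-number binary decoding and character-by-character comparison of the two decoded strings with one integer bitwise OR per row followed by a zero-padded binary format and a str.translate; Pre_ excludes negative entries among the mapped rows (A's while-loop never terminates), entries with more than n bits (malformed for an n-column map: A's leading-n-characters row and B's wider row are both accidental), and negative n whenever a row would actually be produced (B's format spec is invalid there and raises).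
-- outside the precondition, e.g. on solution(1, [2], [0]): A returns ['#'], B returns ['# ']; on solution(-1, [1, 2], [3, 4]): A returns [], B raises ValueError
import Mathlib
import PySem

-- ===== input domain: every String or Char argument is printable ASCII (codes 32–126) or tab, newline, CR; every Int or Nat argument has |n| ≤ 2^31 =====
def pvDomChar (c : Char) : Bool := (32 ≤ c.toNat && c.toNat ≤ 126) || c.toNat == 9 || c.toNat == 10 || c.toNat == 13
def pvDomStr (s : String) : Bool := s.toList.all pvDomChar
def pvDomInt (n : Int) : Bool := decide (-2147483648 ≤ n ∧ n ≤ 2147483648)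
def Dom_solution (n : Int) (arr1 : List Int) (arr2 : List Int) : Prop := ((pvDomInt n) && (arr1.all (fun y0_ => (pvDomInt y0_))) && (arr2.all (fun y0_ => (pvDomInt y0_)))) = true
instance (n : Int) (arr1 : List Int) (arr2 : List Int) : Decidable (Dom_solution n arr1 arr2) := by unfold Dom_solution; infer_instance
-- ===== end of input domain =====

-- B replaces A's hand-rolled per-number binary decoding and char-by-char string comparison with a
-- bitwise OR per row followed by one zero-padded binary format and a char translation (idiomatic).


-- ===== PORT A =====
-- the 'while num != 0' loop of two_bit; fuel num.toNat + 1 suffices for every num ≥ 0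
-- (on num < 0 Python loops forever; such inputs are outside Pre_solution)
def twoBitLoop : Nat → Int → List Char → List Char
  | 0, _, bit => bit
  | f + 1, num, bit =>
      if num = 0 then bit
      else twoBitLoop f (PySem.Int.floordiv num 2) (bit ++ PySem.Int.toChars (PySem.Int.mod num 2))

def two_bit (n : Int) (num : Int) : String :=
  let bit := twoBitLoop (num.toNat + 1) num []
  let bit := bit.reverse  -- bit[::-1]
  let bit := if n > (bit.length : Int)
             then List.replicate (n - (bit.length : Int)).toNat '0' ++ bit
             else bit
  String.ofList bit

-- Python's 'answer' is reset to "" after every appended row, so each row is computed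
-- independently: the outer loop is a map, the inner 'for i in range(n)' a foldl.
def solution (n : Int) (arr1 : List Int) (arr2 : List Int) : List String :=
  let c := List.replicate n.toNat n                      -- [n] * n
  let a1 := (c.zip arr1).map (fun p => two_bit p.1 p.2)  -- map(two_bit, c, arr1) truncates like zip
  let a2 := (c.zip arr2).map (fun p => two_bit p.1 p.2)
  (a1.zip a2).map (fun xy =>
    String.ofList ((PySem.List.pyRange 0 n 1).foldl (fun ans i =>
      if PySem.Str.pyGet? xy.1 i == PySem.Str.pyGet? xy.2 i
         && PySem.Str.pyGet? xy.1 i == some '0'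
      then ans ++ [' '] else ans ++ ['#']) []))

-- ===== PORT B =====
-- the list comprehension over zip(arr1[:n], arr2[:n]) is a map over the zip of the two slices;
-- format(v, f'0{n}b') is PySem.Str.zfill (PySem.Int.toBin v) n (exact for the 0 ≤ n of Pre_);
-- .translate(str.maketrans('10', '# ')) maps '1'→'#', '0'→' ' and leaves any other char.
def solution_alt (n : Int) (arr1 : List Int) (arr2 : List Int) : List String :=
  ((PySem.List.slice arr1 none (some n)).zip (PySem.List.slice arr2 none (some n))).map
    (fun p => String.ofList
      ((PySem.Str.zfill (PySem.Int.toBin (PySem.Int.bor p.1 p.2)) n).toList.map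
        (fun c => if c = '1' then '#' else if c = '0' then ' ' else c)))

-- ===== PRECONDITION & SPEC =====
-- Pre_ excludes: negative entries among the first n of either list (A's 'while num != 0' loop
-- never terminates there); entries with more than n bits — malformed input for an n-column map,
-- on which A's leading-n-characters row and B's wider row are both accidental; and negative n
-- whenever a row would actually be produced (B's f'0{n}b' format spec is invalid there and
-- raises ValueError; with an empty row list both return []).
def Pre_solution (n : Int) (arr1 : List Int) (arr2 : List Int) : Prop :=
  (0 ≤ n ∧ (∀ v ∈ arr1.take n.toNat, 0 ≤ v ∧ v < 2 ^ n.toNat)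
         ∧ (∀ v ∈ arr2.take n.toNat, 0 ≤ v ∧ v < 2 ^ n.toNat))
  ∨ (n < 0 ∧ (arr1.length ≤ (-n).toNat ∨ arr2.length ≤ (-n).toNat))
instance (n : Int) (arr1 : List Int) (arr2 : List Int) : Decidable (Pre_solution n arr1 arr2) := by
  unfold Pre_solution; infer_instance

def pvWitness_solution : Int × List Int × List Int := (5, [9, 20, 28, 18, 11], [30, 1, 21, 17, 28])

def Spec_solution (n : Int) (arr1 : List Int) (arr2 : List Int) (out : List String) : Prop :=
  out = solution_alt n arr1 arr2
instance (n : Int) (arr1 : List Int) (arr2 : List Int) (out : List String) :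
    Decidable (Spec_solution n arr1 arr2 out) := by unfold Spec_solution; infer_instance

-- ===== CLAIM (what is proved, stated in full; the proofs are below) =====
def Claim_equal_solution : Prop := ∀ (n : Int) (arr1 : List Int) (arr2 : List Int),
  Dom_solution n arr1 arr2 → Pre_solution n arr1 arr2 →
  Spec_solution n arr1 arr2 (solution n arr1 arr2)

-- ===== LEMMAS AND PROOFS =====

-- the width-n big-endian bit pattern of m, the common normal form of both ports' row strings
def padN (n m : Nat) : List Char :=
  (List.range n).reverse.map (fun j => if m.testBit j then '1' else '0')

theorem padN_length (n m : Nat) : (padN n m).length = n := by simp [padN]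

theorem padN_succ_high (n m : Nat) :
    padN (n + 1) m = (if m.testBit n then '1' else '0') :: padN n m := by
  simp [padN, List.range_succ]

theorem padN_succ_low (n m : Nat) :
    padN (n + 1) m = padN n (m / 2) ++ [if m % 2 = 1 then '1' else '0'] := by
  simp only [padN, List.range_succ_eq_map, List.reverse_cons, List.map_append, List.map_map,
    List.map_reverse]
  congr 1
  · congr 1
    apply List.map_congr_left; intro j _; simp [Function.comp, Nat.testBit_succ]
  · simp [Nat.testBit_zero]

theorem padN_zero_val (n : Nat) : padN n 0 = List.replicate n '0' := by
  induction n with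
  | zero => rfl
  | succ n ih => rw [padN_succ_high, ih]; simp [List.replicate_succ, Nat.testBit]

-- A's digit accumulator: the least-significant-first binary digits of m (empty for m = 0)
def lsbA : Nat → List Char
  | 0 => []
  | m + 1 => (if (m + 1) % 2 = 1 then '1' else '0') :: lsbA ((m + 1) / 2)
decreasing_by exact Nat.div_lt_self (Nat.succ_pos m) (by omega)

theorem lsbA_pos (m : Nat) (hm : 0 < m) :
    lsbA m = (if m % 2 = 1 then '1' else '0') :: lsbA (m / 2) := by
  cases m with
  | zero => omega
  | succ k => rw [lsbA]

theorem lsbA_length_le (n : Nat) : ∀ m, m < 2 ^ n → (lsbA m).length ≤ n := by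
  induction n with
  | zero => intro m hm; interval_cases m; simp [lsbA]
  | succ n ih =>
      intro m hm
      rcases Nat.eq_zero_or_pos m with h0 | h0
      · subst h0; simp [lsbA]
      · rw [lsbA_pos m h0]
        have := ih (m / 2) (by omega)
        simpa using this

theorem twoBitLoop_spec (f : Nat) : ∀ (m : Nat) (acc : List Char), m < f →
    twoBitLoop f (m : Int) acc = acc ++ lsbA m := by
  induction f with
  | zero => intro m acc h; omega
  | succ f ih =>
      intro m acc h
      rcases Nat.eq_zero_or_pos m with h0 | h0
      · subst h0; simp [twoBitLoop, lsbA]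
      · have hne : (m : Int) ≠ 0 := by exact_mod_cast Nat.pos_iff_ne_zero.mp h0
        have hdiv : PySem.Int.floordiv (m : Int) 2 = ((m / 2 : Nat) : Int) := by
          exact_mod_cast PySem.Int.floordiv_natCast m 2
        have hmod : PySem.Int.mod (m : Int) 2 = ((m % 2 : Nat) : Int) := by
          exact_mod_cast PySem.Int.mod_natCast m 2
        rw [twoBitLoop, if_neg hne, hdiv, hmod]
        have hchars : PySem.Int.toChars ((m % 2 : Nat) : Int) =
            [if m % 2 = 1 then '1' else '0'] := by
          rcases Nat.mod_two_eq_zero_or_one m with h | h <;> rw [h] <;> decide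
        rw [hchars, ih (m / 2) _ (by omega), lsbA_pos m h0]
        simp

theorem lsbA_pad (n : Nat) : ∀ m, m < 2 ^ n →
    List.replicate (n - (lsbA m).reverse.length) '0' ++ (lsbA m).reverse = padN n m := by
  induction n with
  | zero => intro m hm; interval_cases m; simp [lsbA, padN]
  | succ n ih =>
      intro m hm
      rcases Nat.eq_zero_or_pos m with h0 | h0
      · subst h0; simp [lsbA, padN_zero_val]
      · rw [lsbA_pos m h0]
        have hlen : (lsbA (m / 2)).length ≤ n := lsbA_length_le n (m / 2) (by omega)
        have := ih (m / 2) (by omega)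
        rw [padN_succ_low]
        simp only [List.reverse_cons, List.length_append, List.length_reverse,
          List.length_singleton]
        rw [show n + 1 - ((lsbA (m / 2)).length + 1) = n - (lsbA (m / 2)).reverse.length by
          simp, ← List.append_assoc, this]

-- A's string is the reversed digit list, left-padded with zeros up to n when shorter
theorem two_bit_base (n num : Int) (hn : 0 ≤ n) (h0 : 0 ≤ num) :
    (two_bit n num).toList
      = List.replicate (n.toNat - (lsbA num.toNat).length) '0' ++ (lsbA num.toNat).reverse := by
  have hloop : twoBitLoop (num.toNat + 1) num [] = lsbA num.toNat := by
    have h := twoBitLoop_spec (num.toNat + 1) num.toNat [] (by omega)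
    rw [show ((num.toNat : Nat) : Int) = num by omega] at h
    simpa using h
  unfold two_bit
  rw [hloop, String.toList_ofList]
  split
  · rename_i hgt
    rw [show (n - ((lsbA num.toNat).reverse.length : Int)).toNat
          = n.toNat - (lsbA num.toNat).reverse.length by omega]
    simp
  · rename_i hle
    have : n.toNat ≤ (lsbA num.toNat).length := by simp at hle ⊢; omega
    rw [show n.toNat - (lsbA num.toNat).length = 0 by omega]
    simp

-- for an in-range value A's whole string is the width-n bit pattern
theorem two_bit_eq_padN (n num : Int) (hn : 0 ≤ n) (h0 : 0 ≤ num)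
    (hlt : num.toNat < 2 ^ n.toNat) :
    (two_bit n num).toList = padN n.toNat num.toNat := by
  rw [two_bit_base n num hn h0]
  have := lsbA_pad n.toNat num.toNat hlt
  rw [← this]
  simp

-- B's zero-filled format string for an in-range value is the same bit pattern
theorem toDigits_pad (n : Nat) (hn : 1 ≤ n) : ∀ m, m < 2 ^ n →
    List.replicate (n - (Nat.toDigits 2 m).length) '0' ++ Nat.toDigits 2 m = padN n m := by
  induction n with
  | zero => omega
  | succ n ih =>
      intro m hm
      by_cases hsmall : m < 2
      · rw [Nat.toDigits_of_lt_base hsmall, padN_succ_low, show m / 2 = 0 by omega,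
          padN_zero_val, show m.digitChar = if m % 2 = 1 then '1' else '0' by
            interval_cases m <;> decide]
        simp
      · rw [Nat.toDigits_of_base_le (by omega) (by omega)]
        have hn' : 1 ≤ n := by
          by_contra h
          have : n = 0 := by omega
          subst this; omega
        have hlen : (Nat.toDigits 2 (m / 2)).length ≤ n :=
          (Nat.length_toDigits_le_iff (by omega) (by omega)).mpr (by omega)
        have := ih hn' (m / 2) (by omega)
        rw [padN_succ_low]
        simp only [List.length_append, List.length_singleton]
        rw [show n + 1 - ((Nat.toDigits 2 (m / 2)).length + 1)
            = n - (Nat.toDigits 2 (m / 2)).length by omega, ← List.append_assoc, this]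
        congr 1
        rcases Nat.mod_two_eq_zero_or_one m with h | h <;> rw [h] <;> decide

theorem zfill_toBin_toList (n v : Int) (hn : 1 ≤ n) (h0 : 0 ≤ v) (hlt : v.toNat < 2 ^ n.toNat) :
    (PySem.Str.zfill (PySem.Int.toBin v) n).toList = padN n.toNat v.toNat := by
  rw [PySem.Str.toList_zfill, PySem.Int.toList_toBin]
  unfold PySem.Int.toBinChars
  rw [if_neg (by omega)]
  have hpad := toDigits_pad n.toNat (by omega) v.toNat hlt
  have hlen : (Nat.toDigits 2 v.toNat).length ≤ n.toNat :=
    (Nat.length_toDigits_le_iff (by omega) (by omega)).mpr hlt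
  rcases hds : Nat.toDigits 2 v.toNat with _ | ⟨c, rest⟩
  · exfalso
    have h := Nat.length_toDigits_pos (b := 2) (n := v.toNat)
    rw [hds] at h; simp at h
  · have hdig : c.isDigit = true := by
      refine Nat.isDigit_of_mem_toDigits (b := 2) (n := v.toNat) (by omega) (by omega) ?_
      rw [hds]; exact List.mem_cons_self
    have hc : ¬ (c = '+' ∨ c = '-') := by
      rintro (rfl | rfl) <;> simp [Char.isDigit] at hdig
    rw [hds] at hpad hlen
    simp only [PySem.Chars.zfill, if_neg hc]
    split
    · rename_i hle
      have hlEq : (c :: rest).length = n.toNat := by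
        simp only [List.length_cons] at hle hlen ⊢; omega
      rw [← hpad, hlEq]; simp
    · exact hpad

-- the per-character comparison A performs and the translation B performs
theorem padN_or_eq_zip (n : Nat) : ∀ a b : Nat,
    (padN n (a ||| b)).map (fun c => if c = '1' then '#' else if c = '0' then ' ' else c)
      = List.zipWith (fun c d => if c = d ∧ c = '0' then ' ' else '#') (padN n a) (padN n b) := by
  induction n with
  | zero => intro a b; rfl
  | succ n ih =>
      intro a b
      rw [padN_succ_high, padN_succ_high, padN_succ_high, List.map_cons, List.zipWith_cons_cons,
        ih a b, Nat.testBit_or]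
      congr 1
      cases ha : a.testBit n <;> cases hb : b.testBit n <;> simp

-- A's inner index loop over two equal-length strings is the zipWith above
theorem foldl_range_cmp (xs : List Char) : ∀ (ys : List Char) (acc : List Char),
    xs.length = ys.length →
    (List.range xs.length).foldl (fun ans k =>
        if xs[k]? == ys[k]? && xs[k]? == some '0' then ans ++ [' '] else ans ++ ['#']) acc
      = acc ++ List.zipWith (fun c d => if c = d ∧ c = '0' then ' ' else '#') xs ys := by
  induction xs with
  | nil => intro ys acc h; simp
  | cons x xs ih =>
      intro ys acc h
      cases ys with
      | nil => simp at h
      | cons y ys =>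
          simp only [List.length_cons, List.range_succ_eq_map, List.foldl_cons, List.foldl_map,
            List.getElem?_cons_zero, List.zipWith_cons_cons]
          have hstep : ∀ (a : List Char) (k : Nat),
              (if (x :: xs)[k.succ]? == (y :: ys)[k.succ]? && (x :: xs)[k.succ]? == some '0'
               then a ++ [' '] else a ++ ['#'])
              = (if xs[k]? == ys[k]? && xs[k]? == some '0' then a ++ [' '] else a ++ ['#']) := by
            intro a k; simp
          rw [PySem.List.foldl_congr_mem _ _ _ _ (by intro a k _; exact hstep a k)]
          rw [ih ys _ (by simpa using h)]
          by_cases h1 : x = y <;> by_cases h2 : x = '0' <;>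
            simp [h1, h2, Bool.beq_eq_decide_eq, List.append_assoc] <;>
            split_ifs <;> simp

-- zip against the replicate [n]*n is a truncating map
theorem zip_replicate_map {α : Type} (a : Int) : ∀ (k : Nat) (l : List α),
    (List.replicate k a).zip l = (l.take k).map (fun v => (a, v)) := by
  intro k
  induction k with
  | zero => intro l; simp
  | succ k ih =>
      intro l
      cases l with
      | nil => simp
      | cons x l => simp [List.replicate_succ, ih]

-- one row: A's compare-loop equals B's OR-format-translate
theorem row_eq (n a b : Int) (hn : 1 ≤ n) (ha0 : 0 ≤ a) (ha : a < 2 ^ n.toNat)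
    (hb0 : 0 ≤ b) (hb : b < 2 ^ n.toNat) :
    String.ofList ((PySem.List.pyRange 0 n 1).foldl (fun ans i =>
        if PySem.Str.pyGet? (two_bit n a) i == PySem.Str.pyGet? (two_bit n b) i
           && PySem.Str.pyGet? (two_bit n a) i == some '0'
        then ans ++ [' '] else ans ++ ['#']) [])
    = String.ofList ((PySem.Str.zfill (PySem.Int.toBin (PySem.Int.bor a b)) n).toList.map
        (fun c => if c = '1' then '#' else if c = '0' then ' ' else c)) := by
  obtain ⟨m1, rfl⟩ := Int.eq_ofNat_of_zero_le ha0
  obtain ⟨m2, rfl⟩ := Int.eq_ofNat_of_zero_le hb0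
  have hm1 : m1 < 2 ^ n.toNat := by exact_mod_cast ha
  have hm2 : m2 < 2 ^ n.toNat := by exact_mod_cast hb
  have hor : PySem.Int.bor (m1 : Int) (m2 : Int) = ((m1 ||| m2 : Nat) : Int) := by simp
  have horlt : m1 ||| m2 < 2 ^ n.toNat := Nat.or_lt_two_pow hm1 hm2
  rw [hor, zfill_toBin_toList n _ hn (by positivity)
      (by rw [show (((m1 ||| m2 : Nat) : Int)).toNat = m1 ||| m2 from rfl]; exact horlt)]
  rw [show (((m1 ||| m2 : Nat) : Int)).toNat = m1 ||| m2 from rfl]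
  rw [padN_or_eq_zip]
  congr 1
  rw [PySem.List.pyRange_one 0 n]
  simp only [Int.sub_zero, List.foldl_map, zero_add, PySem.Str.pyGet?_natCast]
  rw [two_bit_eq_padN n _ (by omega) (by positivity)
        (by rw [show (((m1 : Nat) : Int)).toNat = m1 from rfl]; exact hm1),
      two_bit_eq_padN n _ (by omega) (by positivity)
        (by rw [show (((m2 : Nat) : Int)).toNat = m2 from rfl]; exact hm2)]
  have hfold := foldl_range_cmp (padN n.toNat m1) (padN n.toNat m2) []
    (by rw [padN_length, padN_length])
  rw [padN_length] at hfold
  simpa using hfold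

-- ===== VERDICT (by name: the statement is the Claim_ definition above) =====
theorem solution_spec : Claim_equal_solution := by
  intro n arr1 arr2 _ hpre
  rcases hpre with ⟨hn0, h1, h2⟩ | ⟨hneg, hlen⟩
  case inr =>
    -- n < 0 and one slice is empty: both programs return []
    unfold Spec_solution
    show solution n arr1 arr2 = solution_alt n arr1 arr2
    have hk : 0 < (-n).toNat := by omega
    have hnn : -(((-n).toNat : Nat) : Int) = n := by omega
    have e1 : PySem.List.slice arr1 none (some n) = arr1.take (arr1.length - (-n).toNat) := by
      have h := PySem.List.slice_to_neg_natCast arr1 (-n).toNat hk; rwa [hnn] at h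
    have e2 : PySem.List.slice arr2 none (some n) = arr2.take (arr2.length - (-n).toNat) := by
      have h := PySem.List.slice_to_neg_natCast arr2 (-n).toNat hk; rwa [hnn] at h
    have hzero : PySem.List.slice arr1 none (some n) = [] ∨
        PySem.List.slice arr2 none (some n) = [] := by
      rcases hlen with h | h
      · left; rw [e1, show arr1.length - (-n).toNat = 0 by omega]; simp
      · right; rw [e2, show arr2.length - (-n).toNat = 0 by omega]; simp
    have hnt : n.toNat = 0 := by omega
    simp only [solution, solution_alt, hnt]
    rcases hzero with h | h <;> simp [h]
  unfold Spec_solution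
  show solution n arr1 arr2 = solution_alt n arr1 arr2
  simp only [solution, solution_alt]
  rw [zip_replicate_map n n.toNat arr1, zip_replicate_map n n.toNat arr2,
      show PySem.List.slice arr1 none (some n) = arr1.take n.toNat from PySem.List.slice_to arr1 hn0,
      show PySem.List.slice arr2 none (some n) = arr2.take n.toNat from PySem.List.slice_to arr2 hn0]
  simp only [List.zip_map, List.map_map]
  apply List.map_congr_left
  intro p hp
  have hzip := List.of_mem_zip (by rw [← Prod.mk.eta (p := p)] at hp; exact hp)
  have ha := h1 _ hzip.1
  have hb := h2 _ hzip.2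
  have hnpos : 1 ≤ n := by
    rcases lt_or_ge n 1 with h | h
    · exfalso
      have : n.toNat = 0 := by omega
      rw [this] at hzip
      simp at hzip
    · exact h
  simpa using row_eq n p.1 p.2 hnpos ha.1 ha.2 hb.1 hb.2
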